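-- pv_equiv track=rewrite | github.com/hanana2000/Clinical_Isolate_target_gene_alignments | top_hits_isolates/compare_hits_between_refs.py | create_prefix_list
-- ===== SOURCE A (Python) =====
-- def create_prefix_list(target_iso_list1, target_iso_list2):
--     """
--     compare lists and output a list with prefixes from both
--     and a list ith lone prefixes only in one list
--
--     """
--     prefix_list, lone_prefixes = [], []
--     combined = target_iso_list1 + target_iso_list2
--     for prefix in combined:
--         if prefix in target_iso_list1 and prefix in target_iso_list2:
--             prefix_list.append(prefix)
--         else: lone_prefixes.append(prefix)
--     prefix_list, lone_prefixes = list(set(prefix_list)), list(set(lone_prefixes))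
--     prefix_list.sort()
--     lone_prefixes.sort()
--     return prefix_list, lone_prefixes
-- ===== SOURCE B (Python) =====
-- def create_prefix_list(target_iso_list1, target_iso_list2):
--     """
--     compare lists and output a list with prefixes from both
--     and a list with lone prefixes only in one list
--     """
--     flags = {}
--     for p in target_iso_list1:
--         flags[p] = (True, False)
--     for p in target_iso_list2:
--         flags[p] = (flags.get(p, (False, False))[0], True)
--     prefix_list, lone_prefixes = [], []
--     for p, (in1, in2) in flags.items():
--         if in1 and in2:
--             prefix_list.append(p)
--         else:
--             lone_prefixes.append(p)
--     prefix_list.sort()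
--     lone_prefixes.sort()
--     return prefix_list, lone_prefixes
-- ===== Notes on version B (the rewrite author's own statement) =====
-- stated objective: faster
-- what changed: Replaces the scan of list1+list2 with repeated 'in' membership tests plus a set() dedup by two dict-building passes (one flag per source list) and a single classification pass over the dict's unique keys.
import Mathlib
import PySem

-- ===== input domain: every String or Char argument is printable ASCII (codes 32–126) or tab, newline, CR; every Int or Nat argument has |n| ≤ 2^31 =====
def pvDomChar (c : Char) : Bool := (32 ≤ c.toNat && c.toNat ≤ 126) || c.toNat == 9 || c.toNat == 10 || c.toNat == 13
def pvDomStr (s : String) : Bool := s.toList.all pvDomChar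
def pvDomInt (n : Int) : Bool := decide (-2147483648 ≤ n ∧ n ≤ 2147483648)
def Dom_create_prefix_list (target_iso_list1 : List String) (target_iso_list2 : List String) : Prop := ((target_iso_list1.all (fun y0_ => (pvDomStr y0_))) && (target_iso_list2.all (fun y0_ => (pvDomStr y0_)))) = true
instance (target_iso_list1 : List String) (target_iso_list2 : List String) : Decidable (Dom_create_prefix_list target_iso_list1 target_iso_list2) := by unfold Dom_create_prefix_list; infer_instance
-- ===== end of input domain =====

-- B replaces A's quadratic membership scan + set() dedup by two dict-building passes and one
-- classification pass over the dict's unique keys (objective: faster).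

-- ===== PORT A =====
def create_prefix_list (target_iso_list1 : List String) (target_iso_list2 : List String) : List String × List String :=
  -- prefix_list, lone_prefixes = [], []; combined = l1 + l2; for prefix in combined: …
  let combined := target_iso_list1 ++ target_iso_list2
  let acc := combined.foldl
    (fun (acc : List String × List String) pfx =>
      if target_iso_list1.contains pfx && target_iso_list2.contains pfx then
        (acc.1 ++ [pfx], acc.2)
      else
        (acc.1, acc.2 ++ [pfx]))
    ([], [])
  -- prefix_list, lone_prefixes = list(set(prefix_list)), list(set(lone_prefixes)); .sort()
  (PySem.List.sorted (PySem.Set.ofList acc.1) (fun x => x) false,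
   PySem.List.sorted (PySem.Set.ofList acc.2) (fun x => x) false)

-- ===== PORT B =====
def create_prefix_list_alt (target_iso_list1 : List String) (target_iso_list2 : List String) : List String × List String :=
  -- flags = {}; for p in l1: flags[p] = (True, False)
  let flags0 := target_iso_list1.foldl
    (fun (d : PySem.Dict String (Bool × Bool)) p => d.insert p (true, false)) PySem.Dict.empty
  -- for p in l2: flags[p] = (flags.get(p, (False, False))[0], True)
  let flags := target_iso_list2.foldl
    (fun (d : PySem.Dict String (Bool × Bool)) p => d.insert p ((d.getD p (false, false)).1, true)) flags0
  -- classification pass over flags.items()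
  let acc := flags.items.foldl
    (fun (acc : List String × List String) it =>
      if it.2.1 && it.2.2 then (acc.1 ++ [it.1], acc.2) else (acc.1, acc.2 ++ [it.1]))
    ([], [])
  (PySem.List.sorted acc.1 (fun x => x) false,
   PySem.List.sorted acc.2 (fun x => x) false)

-- ===== PRECONDITION & SPEC =====
def Spec_create_prefix_list (target_iso_list1 : List String) (target_iso_list2 : List String) (out : List String × List String) : Prop := out = create_prefix_list_alt target_iso_list1 target_iso_list2
instance (target_iso_list1 : List String) (target_iso_list2 : List String) (out : List String × List String) : Decidable (Spec_create_prefix_list target_iso_list1 target_iso_list2 out) := by unfold Spec_create_prefix_list; infer_instance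

-- ===== CLAIM (what is proved, stated in full; the proofs are below) =====
def Claim_equal_create_prefix_list : Prop := ∀ (target_iso_list1 : List String) (target_iso_list2 : List String), Dom_create_prefix_list target_iso_list1 target_iso_list2 → Spec_create_prefix_list target_iso_list1 target_iso_list2 (create_prefix_list target_iso_list1 target_iso_list2)

-- ===== LEMMAS AND PROOFS =====

-- A's pair-accumulator loop is a pair of filters
theorem pv_foldl_pair_filter_id (c : String → Bool) (l : List String) (a b : List String) :
    l.foldl (fun (acc : List String × List String) x =>
      if c x then (acc.1 ++ [x], acc.2) else (acc.1, acc.2 ++ [x])) (a, b)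
      = (a ++ l.filter c, b ++ l.filter (fun x => !(c x))) := by
  induction l generalizing a b with
  | nil => simp
  | cons x t ih =>
    by_cases h : c x = true <;> simp [List.foldl_cons, h, ih]

-- B's pair-accumulator classification loop is a pair of filters
theorem pv_foldl_pair_filter {α : Type} (c : α → Bool) (g : α → String)
    (l : List α) (a b : List String) :
    l.foldl (fun (acc : List String × List String) x =>
      if c x then (acc.1 ++ [g x], acc.2) else (acc.1, acc.2 ++ [g x])) (a, b)
      = (a ++ (l.filter c).map g, b ++ (l.filter (fun x => !(c x))).map g) := by
  induction l generalizing a b with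
  | nil => simp
  | cons x t ih =>
    by_cases h : c x = true <;> simp [List.foldl_cons, h, ih]

-- after the first loop, each key's flags are (p ∈ l1, false)
theorem pv_flags1_getD (l : List String) (d : PySem.Dict String (Bool × Bool)) (q : String) :
    (l.foldl (fun d p => d.insert p (true, false)) d).getD q (false, false)
      = if q ∈ l then (true, false) else d.getD q (false, false) := by
  induction l generalizing d with
  | nil => simp
  | cons x t ih =>
    simp only [List.foldl_cons, ih, PySem.Dict.getD_insert, List.mem_cons]
    by_cases hq : q = x <;> by_cases hm : q ∈ t <;> simp [hq, hm]

-- after the second loop, the second flag is set, the first preserved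
theorem pv_flags2_getD (l : List String) (d : PySem.Dict String (Bool × Bool)) (q : String) :
    (l.foldl (fun d p => d.insert p ((d.getD p (false, false)).1, true)) d).getD q (false, false)
      = if q ∈ l then ((d.getD q (false, false)).1, true) else d.getD q (false, false) := by
  induction l generalizing d with
  | nil => simp
  | cons x t ih =>
    simp only [List.foldl_cons, ih, PySem.Dict.getD_insert, List.mem_cons]
    by_cases hq : q = x <;> by_cases hm : q ∈ t <;> simp [hq, hm]

-- main agreement theorem
theorem pv_main (l1 l2 : List String) :
    create_prefix_list l1 l2 = create_prefix_list_alt l1 l2 := by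
  unfold create_prefix_list create_prefix_list_alt
  dsimp only
  rw [pv_foldl_pair_filter_id (fun p => l1.contains p && l2.contains p) (l1 ++ l2) [] []]
  -- name the dicts
  set flags0 := l1.foldl (fun (d : PySem.Dict String (Bool × Bool)) p => d.insert p (true, false)) PySem.Dict.empty with hflags0
  set flags := l2.foldl (fun (d : PySem.Dict String (Bool × Bool)) p => d.insert p ((d.getD p (false, false)).1, true)) flags0 with hflags
  have hnd0 : flags0.keys.Nodup := by
    rw [hflags0]; exact PySem.Dict.nodup_keys_foldl_insert _ _ _ PySem.Dict.nodup_keys_empty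
  have hnd : flags.keys.Nodup := by
    rw [hflags]; exact PySem.Dict.nodup_keys_foldl_insert _ _ _ hnd0
  -- every key's flags are the membership pair
  have hget : ∀ q : String, flags.getD q (false, false) = (l1.contains q, l2.contains q) := by
    intro q
    rw [hflags, pv_flags2_getD, hflags0, pv_flags1_getD]
    simp only [PySem.Dict.getD_empty]
    by_cases h1 : q ∈ l1 <;> by_cases h2 : q ∈ l2 <;> simp [h1, h2]
  -- keys of flags are exactly the elements of l1 ++ l2
  have hkeys : ∀ q : String, q ∈ flags.keys ↔ q ∈ l1 ++ l2 := by
    intro q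
    rw [hflags, PySem.Dict.keys_foldl_insert, hflags0, PySem.Dict.keys_foldl_insert]
    simp [PySem.Set.mem_update, PySem.Dict.keys_empty]
  -- items of flags
  have hitems : flags.items = flags.keys.map (fun k => (k, (l1.contains k, l2.contains k))) := by
    rw [PySem.Dict.items_eq_map_keys flags hnd (false, false)]
    exact List.map_congr_left (fun k _ => by rw [hget k])
  rw [hitems,
      pv_foldl_pair_filter (fun (it : String × (Bool × Bool)) => it.2.1 && it.2.2) (·.1) _ [] []]
  simp only [List.nil_append, List.filter_map, List.map_map, Prod.mk.injEq]
  -- both components: sorted of permuted nodup lists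
  have key : ∀ c : String → Bool,
      PySem.List.sorted (PySem.Set.ofList ((l1 ++ l2).filter c)) (fun x => x) false
        = PySem.List.sorted (flags.keys.filter c) (fun x => x) false := by
    intro c
    apply PySem.List.sorted_eq_sorted_of_perm _ _ _ (fun a b h => h)
    rw [List.perm_ext_iff_of_nodup (PySem.Set.nodup_ofList _) (hnd.filter c)]
    intro a
    rw [PySem.Set.mem_ofList]
    simp only [List.mem_filter]
    rw [hkeys a]
  refine ⟨?_, ?_⟩
  · rw [key (fun p => l1.contains p && l2.contains p)]
    congr 1
    simp [Function.comp_def]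
  · rw [key (fun p => !(l1.contains p && l2.contains p))]
    congr 1
    simp [Function.comp_def]

-- ===== VERDICT (by name: the statement is the Claim_ definition above) =====
theorem create_prefix_list_spec : Claim_equal_create_prefix_list := by
  intro l1 l2 _
  unfold Spec_create_prefix_list
  exact pv_main l1 l2
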